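-- pv_equiv track=rewrite | github.com/Sebo-the-tramp/PhysBench-Sebfork | run_parallel_general_models_small_multi.py | pick
-- ===== SOURCE A (Python) =====
-- from itertools import combinations
--
-- def pick(free, k, need):
--     # choose k GPUs that minimize fragmentation: first minimize worst leftover, then total leftover
--     best_cost, best = None, None
--     for combo in combinations(range(len(free)), k):
--         if all(free[i] >= need for i in combo):
--             worst_left = max(free[i] - need for i in combo)
--             total_left = sum(free[i] - need for i in combo)
--             cost = (worst_left, total_left)
--             if best_cost is None or cost < best_cost:
--                 best_cost, best = cost, combo
--     return list(best) if best else None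
-- ===== SOURCE B (Python) =====
-- def pick(free, k, need):
--     # take the k eligible GPUs with the smallest free memory; ties go to lower indices
--     eligible = sorted((v, i) for i, v in enumerate(free) if v >= need)
--     if len(eligible) < k:
--         return None
--     return sorted(i for _, i in eligible[:k])
-- ===== Notes on version B (the rewrite author's own statement) =====
-- stated objective: faster
-- what changed: replaces the exhaustive scan over all C(n,k) index combinations with one sort of the eligible (free,index) pairs and taking the k smallest, which provably yields the same lexicographically-first cost-minimal combination; intended as faster: the probe measured 7.68x at n=16, the largest size where A still finished, and A timed out at n=64 where B returned
import Mathlib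
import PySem

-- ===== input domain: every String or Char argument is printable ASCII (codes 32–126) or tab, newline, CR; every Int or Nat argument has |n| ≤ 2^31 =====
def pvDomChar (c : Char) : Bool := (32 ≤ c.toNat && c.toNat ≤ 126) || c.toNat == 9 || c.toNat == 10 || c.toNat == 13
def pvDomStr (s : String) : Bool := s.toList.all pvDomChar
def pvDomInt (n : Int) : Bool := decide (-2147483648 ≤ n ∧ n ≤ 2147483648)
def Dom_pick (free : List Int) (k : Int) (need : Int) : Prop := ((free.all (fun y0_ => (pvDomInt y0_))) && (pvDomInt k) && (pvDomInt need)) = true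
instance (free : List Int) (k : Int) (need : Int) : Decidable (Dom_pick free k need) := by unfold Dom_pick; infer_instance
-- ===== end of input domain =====

-- B replaces A's exhaustive scan over all C(n,k) index combinations by sorting the
-- eligible (free,index) pairs once and taking the k smallest (objective: faster;
-- intended as faster: a timing run measured 7.68x at n=16, the largest size at
-- which A still finished, and A timed out at n=64 where B returned).


-- ===== PORT A =====
-- itertools.combinations(xs, k) in its lexicographic emission order
def pvCombos (k : Nat) (xs : List Int) : List (List Int) :=
  match k, xs with
  | 0, _ => [[]]
  | _ + 1, [] => []
  | kk + 1, x :: rest => ((pvCombos kk rest).map (fun c => x :: c)) ++ pvCombos (kk + 1) rest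

-- Python tuple comparison 'cost < best_cost' on int pairs
def pvCostLt (a b : Int × Int) : Bool := decide (a.1 < b.1) || (decide (a.1 = b.1) && decide (a.2 < b.2))

-- Python max(...) over a nonempty int sequence (the empty case is unreachable under Pre_)
def pvMaxI (l : List Int) : Int := match l with | [] => 0 | y :: ys => ys.foldl max y

def pvLefts (free : List Int) (need : Int) (combo : List Int) : List Int :=
  combo.map (fun i => PySem.List.pyGetD free i 0 - need)

def pvCost (free : List Int) (need : Int) (combo : List Int) : Int × Int :=
  (pvMaxI (pvLefts free need combo), (pvLefts free need combo).foldl (· + ·) 0)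

-- the loop body: update (best_cost, best) if the combo is all-eligible and improves the cost
def pvStep (free : List Int) (need : Int)
    (st : Option (Int × Int) × Option (List Int)) (combo : List Int) :
    Option (Int × Int) × Option (List Int) :=
  if combo.all (fun i => decide (need ≤ PySem.List.pyGetD free i 0)) then
    match st.1 with
    | none => (some (pvCost free need combo), some combo)
    | some bc =>
        if pvCostLt (pvCost free need combo) bc then (some (pvCost free need combo), some combo)
        else st
  else st

def pick (free : List Int) (k : Int) (need : Int) : Option (List Int) :=
  match ((pvCombos k.toNat (PySem.List.pyRange 0 (free.length : Int) 1)).foldl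
      (pvStep free need) (none, none)).2 with
  | some c => if c.isEmpty then none else some c
  | none => none

-- ===== PORT B =====
def pick_alt (free : List Int) (k : Int) (need : Int) : Option (List Int) :=
  let eligible := PySem.List.sorted2
    ((PySem.List.enumerate free).filterMap
      (fun p => if need ≤ p.2 then some (p.2, p.1) else none))
    Prod.fst Prod.snd
  if (eligible.length : Int) < k then none
  else some (PySem.List.sorted
    ((PySem.List.slice eligible none (some k)).map Prod.snd) (fun x => x))

-- ===== PRECONDITION & SPEC =====
-- Pre_ excludes exactly k ≤ 0: there Python A raises (ValueError from max() on an
-- empty sequence for k = 0, from combinations() for k < 0); A returns on every k ≥ 1.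
def Pre_pick (free : List Int) (k : Int) (need : Int) : Prop := 1 ≤ k
instance (free : List Int) (k : Int) (need : Int) : Decidable (Pre_pick free k need) := by unfold Pre_pick; infer_instance

def pvWitness_pick : List Int × Int × Int := ([5, 3, 7], 2, 4)

def Spec_pick (free : List Int) (k : Int) (need : Int) (out : Option (List Int)) : Prop := out = pick_alt free k need
instance (free : List Int) (k : Int) (need : Int) (out : Option (List Int)) : Decidable (Spec_pick free k need out) := by unfold Spec_pick; infer_instance

-- ===== CLAIM (what is proved, stated in full; the proofs are below) =====
def Claim_equal_pick : Prop := ∀ (free : List Int) (k : Int) (need : Int), Dom_pick free k need → Pre_pick free k need → Spec_pick free k need (pick free k need)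

-- ===== LEMMAS AND PROOFS =====

def pvPLt (a b : Int × Int) : Prop := a.1 < b.1 ∨ (a.1 = b.1 ∧ a.2 < b.2)
def pvPLe (a b : Int × Int) : Prop := pvPLt a b ∨ a = b
def pvBefore (a b : Int × Int) : Bool :=
  decide (a.1 < b.1) || (!decide (b.1 < a.1) && decide (a.2 < b.2))

theorem pvBefore_iff (a b : Int × Int) : pvBefore a b = true ↔ pvPLt a b := by
  unfold pvBefore pvPLt; rcases a with ⟨x,y⟩; rcases b with ⟨u,v⟩; simp; omega

theorem pvPLt_asymm {a b : Int × Int} (h : pvPLt a b) : ¬ pvPLt b a := by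
  unfold pvPLt at *; omega

theorem pvPLt_trans {a b c : Int × Int} (h1 : pvPLt a b) (h2 : pvPLt b c) : pvPLt a c := by
  unfold pvPLt at *; omega

theorem pvPLt_irrefl (a : Int × Int) : ¬ pvPLt a a := by unfold pvPLt; omega

theorem pvPLt_total (a b : Int × Int) : a = b ∨ pvPLt a b ∨ pvPLt b a := by
  unfold pvPLt; rcases a with ⟨x,y⟩; rcases b with ⟨u,v⟩
  by_cases h : x = u ∧ y = v
  · left; simp [h.1, h.2]
  · right; simp at h ⊢; omega

theorem pvPLe_trans {a b c : Int × Int} (h1 : pvPLe a b) (h2 : pvPLe b c) : pvPLe a c := by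
  unfold pvPLe at *; unfold pvPLt at *; rcases a with ⟨x,y⟩; rcases b with ⟨u,v⟩; rcases c with ⟨p,q⟩
  simp_all; omega

-- generic insertion-sort characterization for an asymmetric transitive comparator
theorem insertBy_pairwiseQ {α : Type} (before : α → α → Bool)
    (hasym : ∀ a b, before a b = true → before b a = false)
    (htrans : ∀ a b c, before a b = true → before b c = true → before a c = true)
    (x : α) (acc : List α) (h : acc.Pairwise (fun a b => before b a = false)) :
    (PySem.List.insertBy before x acc).Pairwise (fun a b => before b a = false) := by
  induction acc with
  | nil => simp [PySem.List.insertBy]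
  | cons y ys ih =>
      rcases h with _ | ⟨hy, hys⟩
      by_cases hxy : before x y = true
      · simp only [PySem.List.insertBy, hxy, if_pos]
        refine List.Pairwise.cons ?_ (List.Pairwise.cons hy hys)
        intro z hz
        rcases List.mem_cons.mp hz with rfl | hz'
        · exact hasym _ _ hxy
        · by_cases hzx : before z x = true
          · exact absurd (htrans _ _ _ hzx hxy) (by simp [hy z hz'])
          · simpa using hzx
      · simp only [PySem.List.insertBy, hxy]
        refine List.Pairwise.cons ?_ (ih hys)
        intro z hz
        rcases (PySem.List.insertBy_mem_iff before x z ys).mp hz with rfl | hz'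
        · simpa using hxy
        · exact hy z hz'

theorem sorted_unique {α : Type} (before : α → α → Bool) :
    ∀ (S T : List α), S.Pairwise (fun a b => before a b = true) →
      T.Pairwise (fun a b => before b a = false) → S.Perm T → S = T := by
  intro S
  induction S with
  | nil => intro T _ _ hp; exact (List.Perm.nil_eq hp).symm ▸ rfl
  | cons a S' ih =>
      intro T hS hT hp
      rcases T with _ | ⟨b, T'⟩
      · exact absurd hp.symm (by simp)
      rcases hS with _ | ⟨ha, hS'⟩
      rcases hT with _ | ⟨hb, hT'⟩
      by_cases hab : a = b
      · subst hab
        have := ih T' hS' hT' (hp.cons_inv)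
        rw [this]
      · have hbS : b ∈ S' := by
          have : b ∈ a :: S' := hp.symm.subset (by simp)
          rcases List.mem_cons.mp this with h | h
          · exact absurd h.symm hab
          · exact h
        have haT : a ∈ T' := by
          have : a ∈ b :: T' := hp.subset (by simp)
          rcases List.mem_cons.mp this with h | h
          · exact absurd h hab
          · exact h
        exact absurd (ha b hbS) (by simp [hb a haT])

theorem mem_pvCombos : ∀ (k : Nat) (xs c : List Int),
    c ∈ pvCombos k xs ↔ c.Sublist xs ∧ c.length = k := by
  intro k
  induction k with
  | zero =>
      intro xs c
      simp only [pvCombos, List.mem_singleton, List.length_eq_zero_iff]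
      constructor
      · rintro rfl; simp
      · rintro ⟨h1, rfl⟩; rfl
  | succ kk ih =>
      intro xs
      induction xs with
      | nil =>
          intro c
          simp only [pvCombos, List.not_mem_nil, false_iff, not_and]
          intro h
          rw [List.sublist_nil.mp h]
          simp
      | cons x rest ihx =>
          intro c
          simp only [pvCombos, List.mem_append, List.mem_map]
          constructor
          · rintro (⟨c', hc', rfl⟩ | h)
            · rcases (ih rest c').mp hc' with ⟨hs, hl⟩
              exact ⟨List.cons_sublist_cons.mpr hs, by simp [hl]⟩
            · rcases (ihx c).mp h with ⟨hs, hl⟩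
              exact ⟨hs.trans (List.sublist_cons_self x rest), hl⟩
          · rintro ⟨hs, hl⟩
            rcases List.sublist_cons_iff.mp hs with h | ⟨r, rfl, hr⟩
            · exact Or.inr ((ihx c).mpr ⟨h, hl⟩)
            · exact Or.inl ⟨r, (ih rest r).mpr ⟨hr, by simpa using hl⟩, rfl⟩

theorem pvCombos_pairwise : ∀ (k : Nat) (xs : List Int), xs.Pairwise (· < ·) →
    (pvCombos k xs).Pairwise (· < ·) := by
  intro k
  induction k with
  | zero => intro xs _; simp [pvCombos]
  | succ kk ih =>
      intro xs
      induction xs with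
      | nil => intro _; simp [pvCombos]
      | cons x rest ihx =>
          intro hp
          rcases hp with _ | ⟨hx, hrest⟩
          simp only [pvCombos]
          refine List.pairwise_append.mpr ⟨?_, ihx hrest, ?_⟩
          · exact (ih rest hrest).map _ (fun {a b} h => List.cons_lt_cons_iff.mpr (Or.inr ⟨rfl, h⟩))
          · rintro c1 hc1 c2 hc2
            rcases List.mem_map.mp hc1 with ⟨c', _, rfl⟩
            rcases (mem_pvCombos _ _ _).mp hc2 with ⟨hs, hl⟩
            rcases c2 with _ | ⟨y, c2'⟩
            · simp at hl
            · have hy : y ∈ rest := (hs.subset) (by simp)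
              exact List.cons_lt_cons_iff.mpr (Or.inl (hx y hy))

theorem pvCostLt_iff (a b : Int × Int) : pvCostLt a b = true ↔ pvPLt a b := by
  unfold pvCostLt pvPLt; rcases a with ⟨x,y⟩; rcases b with ⟨u,v⟩; simp

def pvValid (free : List Int) (need : Int) (c : List Int) : Bool :=
  c.all (fun i => decide (need ≤ PySem.List.pyGetD free i 0))

theorem foldA_stay (free : List Int) (need : Int) :
    ∀ (L : List (List Int)) (b : List Int),
      (∀ c ∈ L, pvValid free need c = true → ¬ pvPLt (pvCost free need c) (pvCost free need b)) →
      L.foldl (pvStep free need) (some (pvCost free need b), some b)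
        = (some (pvCost free need b), some b) := by
  intro L
  induction L with
  | nil => intro b _; rfl
  | cons c L ih =>
      intro b h
      simp only [List.foldl_cons]
      have hstep : pvStep free need (some (pvCost free need b), some b) c
          = (some (pvCost free need b), some b) := by
        unfold pvStep pvValid at *
        by_cases hv : c.all (fun i => decide (need ≤ PySem.List.pyGetD free i 0)) = true
        · simp only [hv, if_pos]
          have := h c (by simp) hv
          have hlt : pvCostLt (pvCost free need c) (pvCost free need b) = false := by
            by_contra hc
            exact this ((pvCostLt_iff _ _).mp (by simpa using hc))
          simp [hlt]
        · simp [hv]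
      rw [hstep]
      exact ih b (fun c' hc' => h c' (by simp [hc']))

theorem foldA_none (free : List Int) (need : Int) :
    ∀ (L : List (List Int)), (∀ c ∈ L, pvValid free need c = false) →
      L.foldl (pvStep free need) (none, none) = (none, none) := by
  intro L
  induction L with
  | nil => intro _; rfl
  | cons c L ih =>
      intro h
      simp only [List.foldl_cons]
      have : pvStep free need (none, none) c = (none, none) := by
        have hv := h c (by simp)
        unfold pvValid at hv
        unfold pvStep
        rw [if_neg (by simp [hv])]
      rw [this]
      exact ih (fun c' hc' => h c' (by simp [hc']))

theorem foldA_main (free : List Int) (need : Int) :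
    ∀ (L : List (List Int)) (cstar : List Int), cstar ∈ L → pvValid free need cstar = true →
      (∀ c ∈ L, pvValid free need c = true → ¬ pvPLt (pvCost free need c) (pvCost free need cstar)) →
      (∀ c ∈ L, pvValid free need c = true → pvCost free need c = pvCost free need cstar → c = cstar ∨ cstar < c) →
      L.Pairwise (· < ·) →
      ∀ st : Option (Int × Int) × Option (List Int),
        (st = (none, none) ∨ ∃ b, st = (some (pvCost free need b), some b) ∧
          pvPLt (pvCost free need cstar) (pvCost free need b)) →
        L.foldl (pvStep free need) st = (some (pvCost free need cstar), some cstar) := by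
  intro L
  induction L with
  | nil => intro cstar h; simp at h
  | cons c L ih =>
      intro cstar hmem hval hmin htie hpair st hst
      rcases hpair with _ | ⟨hc, hpairL⟩
      simp only [List.foldl_cons]
      by_cases hcc : c = cstar
      · subst hcc
        have hstep : pvStep free need st c = (some (pvCost free need c), some c) := by
          unfold pvStep
          rcases hst with rfl | ⟨b, rfl, hb⟩
          · rw [if_pos (by simpa [pvValid] using hval)]
          · rw [if_pos (by simpa [pvValid] using hval)]
            simp [(pvCostLt_iff _ _).mpr hb]
        rw [hstep]
        exact foldA_stay free need L c (fun c' hc' hv' => hmin c' (by simp [hc']) hv')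
      · have hmem' : cstar ∈ L := by
          rcases List.mem_cons.mp hmem with h | h
          · exact absurd h.symm hcc
          · exact h
        refine ih cstar hmem' hval
          (fun c' hc' => hmin c' (by simp [hc']))
          (fun c' hc' => htie c' (by simp [hc'])) hpairL _ ?_
        by_cases hv : pvValid free need c = true
        · right
          -- c is valid, comes before cstar, so its cost is strictly worse
          have hne : pvCost free need c ≠ pvCost free need cstar := by
            intro he
            rcases htie c (by simp) hv he with h | h
            · exact hcc h
            · exact absurd (hc cstar hmem') (by simp [lt_asymm h])
          have hgt : pvPLt (pvCost free need cstar) (pvCost free need c) := by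
            rcases pvPLt_total (pvCost free need c) (pvCost free need cstar) with h | h | h
            · exact absurd h hne
            · exact absurd h (hmin c (by simp) hv)
            · exact h
          rcases hst with rfl | ⟨b, rfl, hb⟩
          · refine ⟨c, ?_, hgt⟩
            unfold pvStep
            simp only [pvValid] at hv
            simp [hv]
          · unfold pvStep
            simp only [pvValid] at hv
            simp only [hv, if_pos]
            by_cases hlt : pvCostLt (pvCost free need c) (pvCost free need b) = true
            · exact ⟨c, by simp [hlt], hgt⟩
            · exact ⟨b, by simp [hlt], hb⟩
        · -- c invalid: state unchanged
          have hstep : pvStep free need st c = st := by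
            unfold pvStep
            simp only [pvValid] at hv
            simp [hv]
          rw [hstep]
          exact hst

theorem enumerate_getElem : ∀ (xs : List Int) (s : Int) (j : Nat) (h : j < (PySem.List.enumerate xs s).length),
    (PySem.List.enumerate xs s)[j] = (s + j, xs[j]'(by simpa [PySem.List.length_enumerate] using h)) := by
  intro xs
  induction xs with
  | nil => intro s j h; simp [PySem.List.enumerate_nil] at h
  | cons x xs ih =>
      intro s j h
      rcases j with _ | j
      · simp [PySem.List.enumerate_cons]
      · simp only [PySem.List.enumerate_cons, List.getElem_cons_succ]
        rw [ih (s+1) j (by simpa [PySem.List.length_enumerate] using h)]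
        simp; ring_nf

theorem enumerate_eq_map_range (xs : List Int) :
    PySem.List.enumerate xs 0
      = (PySem.List.pyRange 0 (xs.length : Int) 1).map
          (fun i => (i, PySem.List.pyGetD xs i 0)) := by
  apply List.ext_getElem
  · simp [PySem.List.length_enumerate, PySem.List.length_pyRange_one]
  · intro j h1 h2
    rw [enumerate_getElem xs 0 j h1]
    have hj : j < xs.length := by simpa [PySem.List.length_enumerate] using h1
    simp only [List.getElem_map]
    rw [PySem.List.getElem_pyRange_one]
    simp only [zero_add]
    rw [PySem.List.pyGetD_natCast]
    simp [hj]

theorem filterMap_pairs (need : Int) (f : Int → Int) : ∀ (l : List Int),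
    (l.map (fun i => (i, f i))).filterMap
        (fun p => if need ≤ p.2 then some (p.2, p.1) else none)
      = (l.filter (fun i => decide (need ≤ f i))).map (fun i => (f i, i)) := by
  intro l
  induction l with
  | nil => rfl
  | cons x l ih =>
      simp only [List.map_cons, List.filterMap_cons, List.filter_cons]
      by_cases h : need ≤ f x
      · simp [h, ih]
      · simp [h, ih]

theorem pvMaxI_spec : ∀ (y : Int) (ys : List Int),
    (ys.foldl max y) ∈ y :: ys ∧ ∀ x ∈ y :: ys, x ≤ ys.foldl max y := by
  intro y ys
  induction ys generalizing y with
  | nil => simp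
  | cons z zs ih =>
      obtain ⟨hmem, hub⟩ := ih (max y z)
      constructor
      · simp only [List.foldl_cons]
        rcases List.mem_cons.mp hmem with h | h
        · rcases max_choice y z with hc | hc <;> rw [h, hc] <;> simp
        · simp [h]
      · intro x hx
        simp only [List.foldl_cons]
        rcases List.mem_cons.mp hx with rfl | hx'
        · exact le_trans (le_max_left x z) (hub _ (by simp))
        · rcases List.mem_cons.mp hx' with rfl | hx''
          · exact le_trans (le_max_right y x) (hub _ (by simp))
          · exact hub x (by simp [hx''])

theorem pvMaxI_mem {l : List Int} (h : l ≠ []) : pvMaxI l ∈ l := by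
  rcases l with _ | ⟨y, ys⟩
  · simp at h
  · exact (pvMaxI_spec y ys).1

theorem pvMaxI_ub {l : List Int} (x : Int) (hx : x ∈ l) : x ≤ pvMaxI l := by
  rcases l with _ | ⟨y, ys⟩
  · simp at hx
  · exact (pvMaxI_spec y ys).2 x hx

theorem pvMaxI_perm {l l' : List Int} (h : l.Perm l') (hne : l ≠ []) : pvMaxI l = pvMaxI l' := by
  have hne' : l' ≠ [] := by
    intro hc; subst hc; exact hne (List.Perm.eq_nil h)
  apply le_antisymm
  · exact pvMaxI_ub _ (h.subset (pvMaxI_mem hne))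
  · exact pvMaxI_ub _ (h.symm.subset (pvMaxI_mem hne'))

-- max of a monotone-image nonempty list is the image of the last element
theorem pvMaxI_last {α : Type} (h1 : α → Int) (l : List α) (hne : l ≠ [])
    (hp : l.Pairwise (fun a b => h1 a ≤ h1 b)) :
    pvMaxI (l.map h1) = h1 (l[l.length - 1]'(by
      cases l with
      | nil => simp at hne
      | cons a l => simp)) := by
  apply le_antisymm
  · have hmem := pvMaxI_mem (l := l.map h1) (by simpa using hne)
    rcases List.mem_map.mp hmem with ⟨a, ha, heq⟩
    rcases List.mem_iff_getElem.mp ha with ⟨i, hi, rfl⟩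
    rw [← heq]
    by_cases hil : i = l.length - 1
    · subst hil; rfl
    · exact (List.pairwise_iff_getElem.mp hp) i (l.length - 1) hi (by omega) (by omega)
  · exact pvMaxI_ub _ (List.mem_map.mpr ⟨_, List.getElem_mem _, rfl⟩)

theorem dominance : ∀ {q s : List (Int × Int)}, q.Sublist s → s.Pairwise pvPLe →
    ∀ (j : Nat) (hj : j < q.length) (hjs : j < s.length), pvPLe (s[j]'hjs) (q[j]'hj) := by
  intro q s hsub
  induction hsub with
  | slnil => intro _ j hj _; simp at hj
  | @cons q s a hqs ih =>
      intro hp j hj hjs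
      rcases hp with _ | ⟨ha, hp'⟩
      rcases j with _ | j
      · simp only [List.getElem_cons_zero]
        exact ha _ (hqs.subset (List.getElem_mem hj))
      · simp only [List.getElem_cons_succ]
        have hjq : j + 1 < s.length := lt_of_lt_of_le hj hqs.length_le
        have h1 := ih hp' (j + 1) hj hjq
        have h2 : pvPLe (s[j]'(by omega)) (s[j+1]'hjq) :=
          (List.pairwise_iff_getElem.mp hp') j (j+1) (by omega) hjq (by omega)
        exact pvPLe_trans h2 h1
  | @cons₂ q s a hqs ih =>
      intro hp j hj hjs
      rcases hp with _ | ⟨ha, hp'⟩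
      rcases j with _ | j
      · simp only [List.getElem_cons_zero]
        exact Or.inr rfl
      · simp only [List.getElem_cons_succ]
        exact ih hp' j (by simpa using hj) (by simpa using hjs)

theorem countP_ge_of_forall₂ {X Y : List Int} (h : List.Forall₂ (· ≤ ·) X Y) (t : Int) :
    List.countP (fun v => decide (v ≤ t)) Y ≤ List.countP (fun v => decide (v ≤ t)) X := by
  induction h with
  | nil => simp
  | @cons a b X' Y' hab h ih =>
      simp only [List.countP_cons]
      by_cases hb : b ≤ t
      · simp [hb, le_trans hab hb]; omega
      · by_cases ha : a ≤ t <;> simp [ha, hb] <;> omega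

theorem sorted_count_lb {x : List Int} (hp : x.Pairwise (· ≤ ·)) (j : Nat) (hj : j < x.length) :
    j < List.countP (fun v => decide (v ≤ x[j])) x := by
  obtain ⟨t, ht⟩ : ∃ t, x[j] = t := ⟨_, rfl⟩
  rw [ht]
  have hcnt : List.countP (fun v => decide (v ≤ t)) (x.take (j+1)) = j + 1 := by
    have hlen : (x.take (j+1)).length = j + 1 := by simp [List.length_take]; omega
    refine Eq.trans (List.countP_eq_length.mpr ?_) hlen
    intro v hv
    rcases List.mem_take_iff_getElem.mp hv with ⟨i, hi, rfl⟩
    simp only [decide_eq_true_eq]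
    have hix : i < x.length := by
      rcases Nat.lt_or_ge i x.length with h | h
      · exact h
      · exact absurd hi (by simp; omega)
    rcases Nat.lt_or_ge i j with h | h
    · exact ht ▸ (List.pairwise_iff_getElem.mp hp) i j hix hj h
    · have : i = j := by
        have : i < min (j+1) x.length := by simpa [List.length_take] using hi
        omega
      subst this
      exact le_of_eq ht
  have hsum : List.countP (fun v => decide (v ≤ t)) x
      = List.countP (fun v => decide (v ≤ t)) (x.take (j+1))
        + List.countP (fun v => decide (v ≤ t)) (x.drop (j+1)) := by
    conv_lhs => rw [(List.take_append_drop (j+1) x).symm]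
    rw [List.countP_append]
  omega

theorem sorted_count_ub {x : List Int} (hp : x.Pairwise (· ≤ ·)) (t : Int) (j : Nat) (hj : j < x.length)
    (hc : j < List.countP (fun v => decide (v ≤ t)) x) : x[j] ≤ t := by
  by_contra hgt
  push_neg at hgt
  have hdrop : List.countP (fun v => decide (v ≤ t)) (x.drop j) = 0 := by
    rw [List.countP_eq_zero]
    intro v hv
    rcases List.mem_drop_iff_getElem.mp hv with ⟨i, hi, rfl⟩
    simp only [decide_eq_true_eq, not_le]
    have hle : x[j] ≤ x[j + i]'(by omega) := by
      rcases Nat.eq_zero_or_pos i with rfl | hpos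
      · simp
      · exact (List.pairwise_iff_getElem.mp hp) j (j+i) hj (by omega) (by omega)
    omega
  have : List.countP (fun v => decide (v ≤ t)) x
      = List.countP (fun v => decide (v ≤ t)) (x.take j) + 0 := by
    conv_lhs => rw [(List.take_append_drop j x).symm]
    rw [List.countP_append, hdrop]
  have hle := List.countP_le_length (l := x.take j) (p := fun v => decide (v ≤ t))
  simp only [List.length_take] at hle
  omega

theorem sorted_dom {X Y x y : List Int} (hx : x.Perm X) (hy : y.Perm Y)
    (hxp : x.Pairwise (· ≤ ·)) (hyp : y.Pairwise (· ≤ ·))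
    (hf : List.Forall₂ (· ≤ ·) X Y) : List.Forall₂ (· ≤ ·) x y := by
  have hlXY : X.length = Y.length := hf.length_eq
  have hlx : x.length = y.length := by
    rw [hx.length_eq, hy.length_eq, hlXY]
  rw [List.forall₂_iff_get]
  refine ⟨hlx, ?_⟩
  intro j h1 h2
  simp only [List.get_eq_getElem]
  have hstep : j < List.countP (fun v => decide (v ≤ y[j])) x := by
    calc j < List.countP (fun v => decide (v ≤ y[j])) y := sorted_count_lb hyp j h2
      _ = List.countP (fun v => decide (v ≤ y[j])) Y := hy.countP_eq _
      _ ≤ List.countP (fun v => decide (v ≤ y[j])) X := countP_ge_of_forall₂ hf _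
      _ = List.countP (fun v => decide (v ≤ y[j])) x := (hx.countP_eq _).symm
  exact sorted_count_ub hxp _ j h1 hstep

theorem forall₂_sum_le {X Y : List Int} (h : List.Forall₂ (· ≤ ·) X Y) :
    X.foldl (· + ·) 0 ≤ Y.foldl (· + ·) 0 := by
  rw [← List.sum_eq_foldl, ← List.sum_eq_foldl]
  induction h with
  | nil => simp
  | @cons a b X' Y' hab h ih => simp only [List.sum_cons]; omega

theorem forall₂_sum_eq {X Y : List Int} (h : List.Forall₂ (· ≤ ·) X Y)
    (hs : X.sum = Y.sum) : X = Y := by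
  induction h with
  | nil => rfl
  | @cons a b X' Y' hab h ih =>
      simp only [List.sum_cons] at hs
      have hle : X'.sum ≤ Y'.sum := by
        have := forall₂_sum_le h
        rwa [← List.sum_eq_foldl, ← List.sum_eq_foldl] at this
      have hab' : a = b := by omega
      subst hab'
      rw [ih (by omega)]

theorem forall₂_le_lex {x y : List Int} (h : List.Forall₂ (· ≤ ·) x y) : x = y ∨ x < y := by
  induction h with
  | nil => left; rfl
  | @cons a b x' y' hab h ih =>
      rcases lt_or_eq_of_le hab with hlt | rfl
      · right; exact List.cons_lt_cons_iff.mpr (Or.inl hlt)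
      · rcases ih with rfl | hlt
        · left; rfl
        · right; exact List.cons_lt_cons_iff.mpr (Or.inr ⟨rfl, hlt⟩)

theorem pvBefore_asymm : ∀ a b : Int × Int, pvBefore a b = true → pvBefore b a = false := by
  intro a b h
  by_contra hc
  exact pvPLt_asymm ((pvBefore_iff a b).mp h) ((pvBefore_iff b a).mp (by simpa using hc))

theorem pvBefore_trans : ∀ a b c : Int × Int, pvBefore a b = true → pvBefore b c = true → pvBefore a c = true :=
  fun a b c h1 h2 => (pvBefore_iff a c).mpr (pvPLt_trans ((pvBefore_iff a b).mp h1) ((pvBefore_iff b c).mp h2))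

theorem sorted2_pairwiseQ (xs : List (Int × Int)) :
    (PySem.List.sorted2 xs Prod.fst Prod.snd).Pairwise (fun a b => pvBefore b a = false) := by
  have hfold : PySem.List.sorted2 xs Prod.fst Prod.snd
      = xs.foldl (fun acc x => PySem.List.insertBy pvBefore x acc) [] := rfl
  rw [hfold]
  have : ∀ (l : List (Int × Int)) (acc : List (Int × Int)),
      acc.Pairwise (fun a b => pvBefore b a = false) →
      (l.foldl (fun acc x => PySem.List.insertBy pvBefore x acc) acc).Pairwise
        (fun a b => pvBefore b a = false) := by
    intro l
    induction l with
    | nil => intro acc h; simpa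
    | cons x l ih => intro acc h; exact ih _ (insertBy_pairwiseQ pvBefore pvBefore_asymm pvBefore_trans x acc h)
  exact this xs [] (by simp)

theorem sorted2_pairwise_pvPLt (xs : List (Int × Int)) (hnd : xs.Nodup) :
    (PySem.List.sorted2 xs Prod.fst Prod.snd).Pairwise pvPLt := by
  have hQ := sorted2_pairwiseQ xs
  have hnd' : (PySem.List.sorted2 xs Prod.fst Prod.snd).Nodup :=
    ((PySem.List.sorted2_perm xs Prod.fst Prod.snd false).nodup_iff).mpr hnd
  have := List.Pairwise.and hQ hnd'
  refine this.imp ?_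
  rintro a b ⟨hq, hne⟩
  rcases pvPLt_total a b with rfl | h | h
  · exact absurd rfl hne
  · exact h
  · exact absurd ((pvBefore_iff b a).mpr h) (by simp [hq])

theorem pvPLt_perm_unique {S T : List (Int × Int)} (hS : S.Pairwise pvPLt)
    (hT : T.Pairwise pvPLt) (hp : S.Perm T) : S = T := by
  refine sorted_unique pvBefore S T (hS.imp fun h => (pvBefore_iff _ _).mpr h) ?_ hp
  exact hT.imp fun h => pvBefore_asymm _ _ ((pvBefore_iff _ _).mpr h)

theorem rebuild (f : Int → Int) : ∀ (l : List (Int × Int)), (∀ p ∈ l, p.1 = f p.2) →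
    (l.map Prod.snd).map (fun i => (f i, i)) = l := by
  intro l h
  rw [List.map_map]
  conv_rhs => rw [← List.map_id l]
  refine List.map_congr_left ?_
  intro p hp
  simp [← h p hp]

theorem helperQ (free : List Int) (need : Int) (K : Nat) (S : List (Int × Int))
    (hSperm : S.Perm (((PySem.List.pyRange 0 (free.length : Int) 1).filter
        (fun i => decide (need ≤ PySem.List.pyGetD free i 0))).map
        (fun i => (PySem.List.pyGetD free i 0, i))))
    (hSpair : S.Pairwise pvPLt) (hK : 1 ≤ K) (c : List Int)
    (hsub : c.Sublist ((PySem.List.pyRange 0 (free.length : Int) 1).filter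
        (fun i => decide (need ≤ PySem.List.pyGetD free i 0))))
    (hlen : c.length = K) (hcp : c.Pairwise (· < ·)) :
    ∃ q : List (Int × Int), q.Sublist S ∧ q.Pairwise pvPLt ∧ q.length = K ∧
      c.Perm (q.map Prod.snd) ∧
      pvCost free need c = ((q.getD (K-1) (0,0)).1 - need, (q.map (fun p => p.1 - need)).sum) := by
  classical
  set f : Int → Int := fun i => PySem.List.pyGetD free i 0 with hf
  set E := (PySem.List.pyRange 0 (free.length : Int) 1).filter
      (fun i => decide (need ≤ PySem.List.pyGetD free i 0)) with hE
  set cp := c.map (fun i => (f i, i)) with hcpdef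
  have hcnd : c.Nodup := hcp.imp (fun h => ne_of_lt h)
  have hinj : Function.Injective (fun i : Int => (f i, i)) := by
    intro a b h; exact congrArg Prod.snd h
  have hcpnd : cp.Nodup := hcnd.map hinj
  set q := PySem.List.sorted2 cp Prod.fst Prod.snd with hqdef
  have hqperm : q.Perm cp := PySem.List.sorted2_perm cp Prod.fst Prod.snd false
  have hqpair : q.Pairwise pvPLt := sorted2_pairwise_pvPLt cp hcpnd
  have hqlen : q.length = K := by rw [hqperm.length_eq]; simp [hcpdef, hlen]
  have hcpP : cp.Sublist (E.map (fun i => (f i, i))) := hsub.map _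
  have hqsub : q.Sublist S := by
    haveI : Std.Antisymm pvPLt := ⟨fun a b h1 h2 => absurd h2 (pvPLt_asymm h1)⟩
    refine List.sublist_of_subperm_of_pairwise ?_ hqpair hSpair
    exact (hqperm.subperm).trans ((hcpP.subperm).trans (hSperm.symm.subperm))
  have hpermsnd : c.Perm (q.map Prod.snd) := by
    have : (q.map Prod.snd).Perm (cp.map Prod.snd) := hqperm.map _
    have h2 : cp.map Prod.snd = c := by simp [hcpdef, List.map_map, Function.comp_def]
    rw [h2] at this
    exact this.symm
  refine ⟨q, hqsub, hqpair, hqlen, hpermsnd, ?_⟩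
  set h1 : Int × Int → Int := fun p => p.1 - need with hh1
  have hlefts : pvLefts free need c = cp.map h1 := by
    simp [pvLefts, hcpdef, List.map_map, hh1, hf]
  have hLperm : (cp.map h1).Perm (q.map h1) := (hqperm.map _).symm
  have hqne : q ≠ [] := by intro hc; rw [hc] at hqlen; simp at hqlen; omega
  have hqmono : q.Pairwise (fun a b => h1 a ≤ h1 b) := by
    refine hqpair.imp ?_
    intro a b hab
    rcases hab with h | ⟨h, _⟩ <;> simp [hh1] <;> omega
  have hmax : pvMaxI (pvLefts free need c) = h1 (q[q.length - 1]'(by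
      have : 0 < q.length := by omega
      omega)) := by
    rw [hlefts, pvMaxI_perm hLperm (by simp [hcpdef]; intro hc; rw [hc] at hlen; simp at hlen; omega)]
    exact pvMaxI_last h1 q hqne hqmono
  have hsum : (pvLefts free need c).foldl (· + ·) 0 = (q.map h1).sum := by
    rw [hlefts, ← List.sum_eq_foldl]
    exact hLperm.sum_eq
  unfold pvCost
  rw [hmax, hsum]
  have hgetD : q.getD (K-1) (0,0) = q[q.length - 1]'(by omega) := by
    rw [List.getD_eq_getElem _ _ (by omega)]
    congr 1
    omega
  rw [hgetD]

theorem main_eq (free : List Int) (k : Int) (need : Int) (hk : 1 ≤ k) :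
    pick free k need = pick_alt free k need := by
  classical
  set f : Int → Int := fun i => PySem.List.pyGetD free i 0 with hf
  set R := PySem.List.pyRange 0 (free.length : Int) 1 with hR
  set pred : Int → Bool := fun i => decide (need ≤ PySem.List.pyGetD free i 0) with hpred
  set E := R.filter pred with hE
  set P := E.map (fun i => (f i, i)) with hP
  set K := k.toNat with hKdef
  have hK1 : 1 ≤ K := by omega
  have hkK : (K : Int) = k := Int.toNat_of_nonneg (by omega)
  have hRp : R.Pairwise (· < ·) := PySem.List.pairwise_lt_pyRange_one 0 (free.length : Int)
  have hEp : E.Pairwise (· < ·) := hRp.filter pred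
  have hEnd : E.Nodup := hEp.imp (fun h => ne_of_lt h)
  have hPnd : P.Nodup := hEnd.map (fun a b h => congrArg Prod.snd h)
  have hPfm : (PySem.List.enumerate free).filterMap
      (fun p => if need ≤ p.2 then some (p.2, p.1) else none) = P := by
    rw [enumerate_eq_map_range, filterMap_pairs need f R]
  set S := PySem.List.sorted2 P Prod.fst Prod.snd with hSdef
  have hSperm : S.Perm P := PySem.List.sorted2_perm P Prod.fst Prod.snd false
  have hSpair : S.Pairwise pvPLt := sorted2_pairwise_pvPLt P hPnd
  have hSlen : S.length = E.length := by rw [hSperm.length_eq]; simp [hP]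
  have hshape : ∀ p ∈ S, p.1 = f p.2 ∧ p.2 ∈ E := by
    intro p hp
    rcases List.mem_map.mp (hSperm.subset hp) with ⟨i, hi, rfl⟩
    exact ⟨rfl, hi⟩
  have hvalid_sub : ∀ c : List Int, c.Sublist R →
      (c.all (fun i => decide (need ≤ PySem.List.pyGetD free i 0)) = true) → c.Sublist E := by
    intro c hsub hv
    have : c.filter pred = c := List.filter_eq_self.mpr (by
      intro a ha
      simpa [hpred] using (List.all_eq_true.mp hv) a ha)
    have h2 : (c.filter pred).Sublist (R.filter pred) := hsub.filter pred
    rwa [this] at h2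
  -- B unfolds
  have hBeq : pick_alt free k need
      = if (E.length : Int) < k then none
        else some (PySem.List.sorted ((S.take K).map Prod.snd) (fun x => x)) := by
    show (if ((PySem.List.sorted2 ((PySem.List.enumerate free).filterMap
          (fun p => if need ≤ p.2 then some (p.2, p.1) else none)) Prod.fst Prod.snd).length : Int) < k
        then none
        else some (PySem.List.sorted ((PySem.List.slice (PySem.List.sorted2
          ((PySem.List.enumerate free).filterMap
            (fun p => if need ≤ p.2 then some (p.2, p.1) else none)) Prod.fst Prod.snd)
          none (some k)).map Prod.snd) (fun x => x))) = _
    rw [hPfm]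
    rw [PySem.List.slice_to _ (by omega)]
    rw [← hSdef, hSlen, ← hKdef]
  by_cases hcase : E.length < K
  · -- not enough eligible GPUs: both sides none
    have hA : ∀ c ∈ pvCombos K R, pvValid free need c = false := by
      intro c hc
      rcases (mem_pvCombos K R c).mp hc with ⟨hsub, hlen⟩
      by_contra hv
      have hv' : pvValid free need c = true := by
        cases h : pvValid free need c
        · exact absurd h hv
        · rfl
      have := (hvalid_sub c hsub hv').length_le
      omega
    unfold pick
    rw [← hR, ← hKdef]
    rw [foldA_none free need _ hA]
    rw [hBeq, if_pos (by omega)]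
  · -- enough eligible GPUs
    push_neg at hcase
    set T := S.take K with hT
    have hTlen : T.length = K := by simp [hT, hSlen]; omega
    set X := T.map Prod.snd with hX
    set cstar := PySem.List.sorted X (fun x => x) with hcstar
    have hTsub : T.Sublist S := List.take_sublist K S
    have hTpair : T.Pairwise pvPLt := hSpair.sublist hTsub
    have hTnd : T.Nodup := hTpair.imp (fun {a b} h he => absurd (he ▸ h) (pvPLt_irrefl _))
    have hXnd : X.Nodup := by
      refine List.Nodup.map_on ?_ hTnd
      intro x hx y hy hxy
      have hx1 := (hshape x (hTsub.subset hx)).1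
      have hy1 := (hshape y (hTsub.subset hy)).1
      have : x = (f x.2, x.2) := by rw [← hx1]
      rw [this, hxy, ← hy1]
    have hcsperm : cstar.Perm X := PySem.List.sorted_perm X (fun x => x) false
    have hcsle : cstar.Pairwise (· ≤ ·) := PySem.List.sorted_pairwise X (fun x => x)
    have hcsnd : cstar.Nodup := hcsperm.nodup_iff.mpr hXnd
    have hcsp : cstar.Pairwise (· < ·) := by
      have := List.Pairwise.and hcsle hcsnd
      exact this.imp (fun ⟨h1, h2⟩ => lt_of_le_of_ne h1 h2)
    have hcslen : cstar.length = K := by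
      rw [hcsperm.length_eq, hX, List.length_map, hTlen]
    have hcssubE : cstar.Sublist E := by
      haveI : Std.Antisymm ((· < ·) : Int → Int → Prop) :=
        ⟨fun a b h1 h2 => absurd h2 (lt_asymm h1)⟩
      refine List.sublist_of_subperm_of_pairwise ?_ hcsp hEp
      refine List.Nodup.subperm hcsnd ?_
      intro i hi
      rcases List.mem_map.mp (hcsperm.subset hi) with ⟨p, hp, rfl⟩
      exact (hshape p (hTsub.subset hp)).2
    have hcssubR : cstar.Sublist R := hcssubE.trans List.filter_sublist
    have hcsvalid : pvValid free need cstar = true := by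
      unfold pvValid
      rw [List.all_eq_true]
      intro i hi
      have := List.mem_filter.mp (hcssubE.subset hi)
      simpa [hpred] using this.2
    have hcsmem : cstar ∈ pvCombos K R := (mem_pvCombos K R cstar).mpr ⟨hcssubR, hcslen⟩
    -- cstar's sorted pair list is exactly T
    obtain ⟨qs, hqsub, hqpair, hqlen, hqsnd, hqcost⟩ :=
      helperQ free need K S hSperm hSpair hK1 cstar hcssubE hcslen hcsp
    have hqT : qs = T := by
      refine pvPLt_perm_unique hqpair hTpair ?_
      have h1 : (qs.map Prod.snd).Perm X := hqsnd.symm.trans hcsperm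
      have h2 : (qs.map Prod.snd).map (fun i => (f i, i)) = qs :=
        rebuild f qs (fun p hp => (hshape p (hqsub.subset hp)).1)
      have h3 : X.map (fun i => (f i, i)) = T :=
        rebuild f T (fun p hp => (hshape p (hTsub.subset hp)).1)
      have h4 : ((qs.map Prod.snd).map (fun i => (f i, i))).Perm
          (X.map (fun i => (f i, i))) := h1.map _
      rw [h2, h3] at h4
      exact h4
    subst hqT
    have hcostcs := hqcost
    -- facts for an arbitrary valid combo
    have key : ∀ c ∈ pvCombos K R, pvValid free need c = true →
        (¬ pvPLt (pvCost free need c) (pvCost free need cstar)) ∧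
        (pvCost free need c = pvCost free need cstar → c = cstar ∨ cstar < c) := by
      intro c hc hv
      rcases (mem_pvCombos K R c).mp hc with ⟨hsubR, hlen⟩
      have hcp : c.Pairwise (· < ·) := hRp.sublist hsubR
      have hsubE : c.Sublist E := hvalid_sub c hsubR hv
      obtain ⟨q, hqs, hqp, hql, hqsn, hqc⟩ := helperQ free need K S hSperm hSpair hK1 c hsubE hlen hcp
      have hdom : ∀ (j : Nat) (hj : j < K),
          pvPLe (T[j]'(by omega)) (q[j]'(by omega)) := by
        intro j hj
        have hjS : j < S.length := by omega
        have := dominance hqs (hSpair.imp (fun h => Or.inl h)) j (by omega) hjS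
        have hTj : T[j]'(by omega) = S[j]'hjS := by
          simp [hT]
        rw [hTj]
        exact this
      have hf2 : List.Forall₂ (· ≤ ·) (T.map (fun p => p.1 - need)) (q.map (fun p => p.1 - need)) := by
        rw [List.forall₂_iff_get]
        constructor
        · simp [hTlen, hql]
        · intro j h1 h2
          simp only [List.get_eq_getElem, List.getElem_map]
          have := hdom j (by simp [hTlen] at h1; omega)
          rcases this with h | h
          · rcases h with h | ⟨h, _⟩ <;> omega
          · rw [h]
      have hwle : (T.getD (K-1) (0,0)).1 ≤ (q.getD (K-1) (0,0)).1 := by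
        have h1 : T.getD (K-1) (0,0) = T[K-1]'(by omega) := List.getD_eq_getElem _ _ (by omega)
        have h2 : q.getD (K-1) (0,0) = q[K-1]'(by omega) := List.getD_eq_getElem _ _ (by omega)
        rw [h1, h2]
        rcases hdom (K-1) (by omega) with h | h
        · rcases h with h | ⟨h, _⟩ <;> omega
        · rw [h]
      have hsle : (T.map (fun p => p.1 - need)).sum ≤ (q.map (fun p => p.1 - need)).sum := by
        have := forall₂_sum_le hf2
        rwa [← List.sum_eq_foldl, ← List.sum_eq_foldl] at this
      constructor
      · intro hlt
        rw [hqc, hcostcs] at hlt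
        unfold pvPLt at hlt
        simp only [] at hlt
        rcases hlt with h | ⟨h1, h2⟩
        · omega
        · omega
      · intro heq
        rw [hqc, hcostcs] at heq
        have hsumeq : (T.map (fun p => p.1 - need)).sum = (q.map (fun p => p.1 - need)).sum := by
          have := congrArg Prod.snd heq
          simpa using this.symm
        have hmapeq : T.map (fun p => p.1 - need) = q.map (fun p => p.1 - need) :=
          forall₂_sum_eq hf2 hsumeq
        have hfsteq : ∀ (j : Nat) (hj : j < K), (T[j]'(by omega)).1 = (q[j]'(by omega)).1 := by
          intro j hj
          have := congrArg (fun l => l[j]?) hmapeq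
          simp only [List.getElem?_map] at this
          rw [List.getElem?_eq_getElem (by omega), List.getElem?_eq_getElem (by omega)] at this
          simp at this
          omega
        have hf2snd : List.Forall₂ (· ≤ ·) X (q.map Prod.snd) := by
          rw [List.forall₂_iff_get]
          constructor
          · simp [hX, hTlen, hql]
          · intro j h1 h2
            simp only [List.get_eq_getElem, hX, List.getElem_map]
            have hj : j < K := by simp [hX, hTlen] at h1; omega
            rcases hdom j hj with h | h
            · rcases h with h | ⟨_, h⟩
              · exact absurd h (by rw [hfsteq j hj]; omega)
              · omega
            · rw [h]
        have hford : List.Forall₂ (· ≤ ·) cstar c := by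
          refine sorted_dom hcsperm hqsn ?_ ?_ hf2snd
          · exact hcsle
          · exact hcp.imp (fun h => le_of_lt h)
        rcases forall₂_le_lex hford with h | h
        · exact Or.inl h.symm
        · exact Or.inr h
    -- assemble
    unfold pick
    rw [← hR, ← hKdef]
    rw [foldA_main free need (pvCombos K R) cstar hcsmem hcsvalid
      (fun c hc hv => (key c hc hv).1) (fun c hc hv => (key c hc hv).2)
      (pvCombos_pairwise K R hRp) (none, none) (Or.inl rfl)]
    simp only
    have hnlt : ¬ ((E.length : Int) < k) := by
      rw [← hkK]
      exact_mod_cast not_lt.mpr hcase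
    have hne : cstar.isEmpty = false := by
      rw [List.isEmpty_eq_false_iff]
      intro hc
      rw [hc] at hcslen
      simp at hcslen
      omega
    rw [hne, hBeq, if_neg hnlt]
    simp

-- ===== VERDICT (by name: the statement is the Claim_ definition above) =====
theorem pick_spec : Claim_equal_pick := by
  intro free k need _ hpre
  unfold Spec_pick
  exact main_eq free k need hpre
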